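-- pv_equiv track=rewrite | github.com/Tomkers77/pp1 | 09-Test2/p2.py | f
-- ===== SOURCE A (Python) =====
-- def f(human_age):
--     wynik = 0
--     for i in range(human_age):
--         if i == 0 or i ==1:
--             wynik += 10
--         else:
--             wynik += 4
--     return wynik
-- ===== SOURCE B (Python) =====
-- def f(human_age):
--     if human_age <= 0:
--         return 0
--     if human_age == 1:
--         return 10
--     return 20 + 4 * (human_age - 2)
-- ===== Notes on version B (the rewrite author's own statement) =====
-- stated objective: faster
-- what changed: Replaced the per-year accumulation loop with a closed-form piecewise arithmetic formula evaluated in constant time.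
import Mathlib
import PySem

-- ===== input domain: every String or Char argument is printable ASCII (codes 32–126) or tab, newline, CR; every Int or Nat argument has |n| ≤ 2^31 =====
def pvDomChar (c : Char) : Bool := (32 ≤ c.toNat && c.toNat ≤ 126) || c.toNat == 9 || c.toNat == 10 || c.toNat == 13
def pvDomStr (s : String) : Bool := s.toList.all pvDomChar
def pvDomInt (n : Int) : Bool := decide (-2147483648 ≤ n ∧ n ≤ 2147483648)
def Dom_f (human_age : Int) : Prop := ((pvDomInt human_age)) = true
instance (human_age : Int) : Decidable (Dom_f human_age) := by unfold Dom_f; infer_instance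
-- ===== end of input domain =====

-- B replaces A's per-year accumulation loop by a closed-form case formula (O(1) instead of O(n)).

-- ===== PORT A =====
def f (human_age : Int) : Int :=
  (PySem.List.pyRange 0 human_age 1).foldl
    (fun wynik i => if i == 0 || i == 1 then wynik + 10 else wynik + 4) 0

-- ===== PORT B =====
def f_alt (human_age : Int) : Int :=
  if human_age ≤ 0 then 0
  else if human_age = 1 then 10
  else 20 + 4 * (human_age - 2)

-- ===== PRECONDITION & SPEC =====
def Spec_f (human_age : Int) (out : Int) : Prop := out = f_alt human_age
instance (human_age : Int) (out : Int) : Decidable (Spec_f human_age out) := by unfold Spec_f; infer_instance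

-- ===== CLAIM (what is proved, stated in full; the proofs are below) =====
def Claim_equal_f : Prop := ∀ (human_age : Int), Dom_f human_age → Spec_f human_age (f human_age)

-- ===== LEMMAS AND PROOFS =====

theorem f_nat (k : Nat) : f (k : Int) = f_alt (k : Int) := by
  induction k with
  | zero => decide
  | succ k ih =>
    have h : PySem.List.pyRange 0 ((k : Int) + 1) 1
        = PySem.List.pyRange 0 (k : Int) 1 ++ [(k : Int)] :=
      PySem.List.pyRange_one_succ_right (by exact_mod_cast Nat.zero_le k)
    have hf : f ((k : Int) + 1)
        = (if (k : Int) == 0 || (k : Int) == 1 then f (k : Int) + 10 else f (k : Int) + 4) := by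
      rw [f, h, List.foldl_append]; rfl
    rw [show ((k + 1 : Nat) : Int) = (k : Int) + 1 by push_cast; ring, hf, ih]
    unfold f_alt
    rcases k with _ | _ | k
    · decide
    · decide
    · have h0 : ¬(((k + 2 : Nat) : Int) == 0 || ((k + 2 : Nat) : Int) == 1) = true := by
        simp only [Bool.or_eq_true, beq_iff_eq]
        push_cast; omega
      rw [if_neg h0]
      split_ifs <;> push_cast <;> omega

-- ===== VERDICT (by name: the statement is the Claim_ definition above) =====
theorem f_spec : Claim_equal_f := by
  intro n _
  unfold Spec_f
  rcases (by omega : n ≤ 0 ∨ 0 < n) with h | h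
  · rw [f_alt, if_pos h]
    simp [f, PySem.List.pyRange_one_eq_nil h]
  · have : n = ((n.toNat : Nat) : Int) := by omega
    rw [this]; exact f_nat n.toNat
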